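-- pv_equiv track=rewrite | github.com/Marck100/Problems | Problem_45/ex 1.py | calc_starting_point
-- ===== SOURCE A (Python) =====
-- def calc_starting_point(monuments):
--     sum = 0
--     count = 0
--     # Per ogni posizione x lungo la quale(verticalmente) si distribuiscono i monumenti, vado a calcolare la mediana
--     for key in monuments:
--         y_array = sorted(monuments[key])
--         mean = y_array[len(y_array)//2]
--
--         sum += mean
--         count += 1
--
--     # Restituisco la media delle mediane calcolate
--     return (sum//count)
-- ===== SOURCE B (Python) =====
-- def calc_starting_point(monuments):
--     total = 0
--     for ys in monuments.values():
--         total += _select(ys, len(ys) // 2)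
--     return total // len(monuments)
--
--
-- def _select(ys, k):
--     # iterative three-way-partition quickselect: k-th smallest of ys
--     while True:
--         p = ys[0]
--         lt = [y for y in ys if y < p]
--         if k < len(lt):
--             ys = lt
--             continue
--         eqc = 0
--         for y in ys:
--             if y == p:
--                 eqc += 1
--         if k < len(lt) + eqc:
--             return p
--         ys = [y for y in ys if y > p]
--         k -= len(lt) + eqc
-- ===== Notes on version B (the rewrite author's own statement) =====
-- stated objective: alternative
-- what changed: B replaces each per-key full sort plus index with an iterative three-way-partition quickselect for the len//2-th smallest element, iterates the dict's values directly and divides the running total by len(monuments) instead of maintaining a counter.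
import Mathlib
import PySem

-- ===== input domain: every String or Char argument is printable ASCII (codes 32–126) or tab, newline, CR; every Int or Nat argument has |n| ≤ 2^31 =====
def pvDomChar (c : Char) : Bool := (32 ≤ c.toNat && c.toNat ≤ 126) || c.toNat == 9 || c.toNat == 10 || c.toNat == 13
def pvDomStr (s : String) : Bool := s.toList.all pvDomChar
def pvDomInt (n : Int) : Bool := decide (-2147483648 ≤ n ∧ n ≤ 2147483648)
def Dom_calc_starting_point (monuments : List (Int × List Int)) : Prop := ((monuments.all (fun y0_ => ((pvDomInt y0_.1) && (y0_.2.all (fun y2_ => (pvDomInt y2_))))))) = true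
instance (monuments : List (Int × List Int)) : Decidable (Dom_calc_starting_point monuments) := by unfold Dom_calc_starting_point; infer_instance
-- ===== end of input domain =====

-- B replaces each per-key sort+index with an iterative three-way-partition quickselect and divides the total by the dict size directly (alternative algorithm, similar cost).


-- ===== PORT A =====
-- for key in monuments: y_array = sorted(monuments[key]); mean = y_array[len(y_array)//2]; sum += mean; count += 1; return sum//count
-- dict lookup monuments[key] is first-match get? on the association list; the .getD [] / .getD 0
-- defaults are the KeyError/IndexError cases, never reached under Pre_ (nodup keys, no empty y-list).
def calc_starting_point (monuments : List (Int × List Int)) : Int :=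
  let r := monuments.foldl (fun (sc : Int × Int) kv =>
      let y_array := PySem.List.sorted (((PySem.Dict.mk monuments).get? kv.1).getD []) (fun y => y) false
      let mean := (PySem.List.pyGet? y_array (PySem.Int.floordiv (y_array.length : Int) 2)).getD 0
      (sc.1 + mean, sc.2 + 1)) ((0 : Int), (0 : Int))
  PySem.Int.floordiv r.1 r.2

-- ===== PORT B =====
-- _select(ys, k) of Source B: iterative three-way-partition quickselect for the k-th smallest; the
-- while-loop is this recursion (state = (ys, k)); the [] case is Python's ys[0] IndexError,
-- never reached on the inputs _select is called with under Pre_.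
def pvSelect : List Int → Nat → Int
  | [], _ => 0
  | p :: t, k =>
    if k < ((p :: t).filter (fun y => decide (y < p))).length then
      pvSelect ((p :: t).filter (fun y => decide (y < p))) k
    else if k < ((p :: t).filter (fun y => decide (y < p))).length + (p :: t).countP (fun y => y == p) then
      p
    else
      pvSelect ((p :: t).filter (fun y => decide (p < y)))
        (k - (((p :: t).filter (fun y => decide (y < p))).length + (p :: t).countP (fun y => y == p)))
termination_by ys _ => ys.length
decreasing_by
  · exact List.length_filter_lt_length_iff_exists.mpr ⟨p, by simp, by simp⟩
  · exact List.length_filter_lt_length_iff_exists.mpr ⟨p, by simp, by simp⟩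

-- total = sum of _select(ys, len(ys)//2) over monuments.values(); return total // len(monuments)
def calc_starting_point_alt (monuments : List (Int × List Int)) : Int :=
  let total := monuments.foldl (fun acc kv => acc + pvSelect kv.2 (kv.2.length / 2)) 0
  PySem.Int.floordiv total (monuments.length : Int)

-- ===== PRECONDITION & SPEC =====
-- Pre_ excludes: the empty dict (A raises ZeroDivisionError), any empty y-list (A raises
-- IndexError), and association lists with duplicate keys (not representable as a Python dict,
-- so outside the Python input space; the assoc-list reading would be ambiguous there).
def Pre_calc_starting_point (monuments : List (Int × List Int)) : Prop :=
  monuments ≠ [] ∧ (∀ kv ∈ monuments, kv.2 ≠ []) ∧ (monuments.map Prod.fst).Nodup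
instance (monuments : List (Int × List Int)) : Decidable (Pre_calc_starting_point monuments) := by unfold Pre_calc_starting_point; infer_instance

def pvWitness_calc_starting_point : (List (Int × List Int)) := [(0, [3, 1, 2]), (5, [7])]

def Spec_calc_starting_point (monuments : List (Int × List Int)) (out : Int) : Prop := out = calc_starting_point_alt monuments
instance (monuments : List (Int × List Int)) (out : Int) : Decidable (Spec_calc_starting_point monuments out) := by unfold Spec_calc_starting_point; infer_instance

-- ===== CLAIM (what is proved, stated in full; the proofs are below) =====
def Claim_equal_calc_starting_point : Prop := ∀ (monuments : List (Int × List Int)), Dom_calc_starting_point monuments → Pre_calc_starting_point monuments → Spec_calc_starting_point monuments (calc_starting_point monuments)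

-- ===== LEMMAS AND PROOFS =====

-- the three-way partition of ys at p is a permutation of ys
lemma perm3 (p : Int) (ys : List Int) :
    (ys.filter (fun y => decide (y < p)) ++ ys.filter (fun y => y == p)
      ++ ys.filter (fun y => decide (p < y))).Perm ys := by
  induction ys with
  | nil => simp
  | cons y ys ih =>
    rcases lt_trichotomy y p with h | h | h
    · have e1 : decide (y < p) = true := by simpa using h
      have e2 : (y == p) = false := by simp [h.ne]
      have e3 : decide (p < y) = false := by simp [not_lt.mpr h.le]
      simpa [List.filter_cons, e1, e2, e3] using ih.cons y
    · have e1 : decide (y < p) = false := by simp [h]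
      have e2 : (y == p) = true := by simp [h]
      have e3 : decide (p < y) = false := by simp [h]
      simp only [List.filter_cons, e1, e2, e3, if_true, if_false, Bool.false_eq_true]
      rw [List.append_assoc]
      exact (List.perm_middle).trans (by simpa [List.append_assoc] using ih.cons y)
    · have e1 : decide (y < p) = false := by simp [not_lt.mpr h.le]
      have e2 : (y == p) = false := by simp [h.ne']
      have e3 : decide (p < y) = true := by simpa using h
      simp only [List.filter_cons, e1, e2, e3, if_true, if_false, Bool.false_eq_true]
      exact (List.perm_middle).trans (by simpa [List.append_assoc] using ih.cons y)

-- sorted ys decomposes around any pivot p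
lemma sorted_decomp (ys : List Int) (p : Int) :
    PySem.List.sorted ys (fun y => y) false =
      PySem.List.sorted (ys.filter (fun y => decide (y < p))) (fun y => y) false
        ++ ys.filter (fun y => y == p)
        ++ PySem.List.sorted (ys.filter (fun y => decide (p < y))) (fun y => y) false := by
  refine PySem.List.sorted_id_eq_of_perm_of_pairwise _ _ ?_ ?_
  · exact (((PySem.List.sorted_perm _ _ _).append
      (List.Perm.refl (ys.filter (fun y => y == p)))).append
      (PySem.List.sorted_perm _ _ _)).trans (perm3 p ys)
  · have hA : ∀ x ∈ PySem.List.sorted (ys.filter (fun y => decide (y < p))) (fun y => y) false, x < p := by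
      intro x hx
      have := (PySem.List.mem_sorted _ _ _ _).mp hx
      simpa using (List.mem_filter.mp this).2
    have hE : ∀ x ∈ ys.filter (fun y => y == p), x = p := by
      intro x hx
      exact eq_of_beq (List.mem_filter.mp hx).2
    have hG : ∀ x ∈ PySem.List.sorted (ys.filter (fun y => decide (p < y))) (fun y => y) false, p < x := by
      intro x hx
      have := (PySem.List.mem_sorted _ _ _ _).mp hx
      simpa using (List.mem_filter.mp this).2
    rw [List.append_assoc]
    rw [List.pairwise_append]
    refine ⟨PySem.List.sorted_pairwise _ _, ?_, ?_⟩
    · rw [List.pairwise_append]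
      refine ⟨List.pairwise_of_forall_mem_list (fun a ha b hb => by rw [hE a ha, hE b hb]),
        PySem.List.sorted_pairwise _ _, ?_⟩
      intro a ha b hb
      exact le_of_lt (by rw [hE a ha]; exact hG b hb)
    · intro a ha b hb
      rcases List.mem_append.mp hb with hb | hb
      · exact le_of_lt (by rw [hE b hb]; exact hA a ha)
      · exact le_of_lt ((hA a ha).trans (hG b hb))

lemma countP_eq_len_filter (ys : List Int) (p : Int) :
    ys.countP (fun y => y == p) = (ys.filter (fun y => y == p)).length := by
  simp [List.countP_eq_length_filter]

lemma length_split (ys : List Int) (p : Int) :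
    ys.length = (ys.filter (fun y => decide (y < p))).length
      + (ys.filter (fun y => y == p)).length
      + (ys.filter (fun y => decide (p < y))).length := by
  have := (perm3 p ys).length_eq
  simp only [List.length_append] at this
  omega

-- quickselect computes the k-th element of the sorted list
lemma pvSelect_eq_sorted (ys : List Int) (k : Nat) : k < ys.length →
    some (pvSelect ys k) = (PySem.List.sorted ys (fun y => y) false)[k]? := by
  induction ys, k using pvSelect.induct with
  | case1 k => intro hk; simp at hk
  | case2 p t k hlt ih =>
    intro hk
    have hSA : (PySem.List.sorted ((p :: t).filter (fun y => decide (y < p))) (fun y => y) false).length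
        = ((p :: t).filter (fun y => decide (y < p))).length := PySem.List.length_sorted ..
    rw [sorted_decomp (p :: t) p]
    rw [List.getElem?_append_left (by simp only [List.length_append, hSA]; omega),
        List.getElem?_append_left (by omega)]
    simp only [pvSelect, if_pos hlt]
    exact ih hlt
  | case3 p t k hlt hmid =>
    intro hk
    have hSA : (PySem.List.sorted ((p :: t).filter (fun y => decide (y < p))) (fun y => y) false).length
        = ((p :: t).filter (fun y => decide (y < p))).length := PySem.List.length_sorted ..
    have hE := countP_eq_len_filter (p :: t) p
    rw [sorted_decomp (p :: t) p]
    rw [List.getElem?_append_left (by simp only [List.length_append, hSA]; omega),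
        List.getElem?_append_right (by omega)]
    have hidx : k - (PySem.List.sorted ((p :: t).filter (fun y => decide (y < p))) (fun y => y) false).length
        < ((p :: t).filter (fun y => y == p)).length := by omega
    rw [List.getElem?_eq_getElem hidx]
    have hmem := List.getElem_mem hidx
    have hval : ((p :: t).filter (fun y => y == p))[k - (PySem.List.sorted ((p :: t).filter (fun y => decide (y < p))) (fun y => y) false).length]'hidx = p :=
      eq_of_beq (List.mem_filter.mp hmem).2
    rw [hval]
    simp only [pvSelect, if_neg hlt, if_pos hmid]
  | case4 p t k hlt hmid ih =>
    intro hk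
    have hSA : (PySem.List.sorted ((p :: t).filter (fun y => decide (y < p))) (fun y => y) false).length
        = ((p :: t).filter (fun y => decide (y < p))).length := PySem.List.length_sorted ..
    have hE := countP_eq_len_filter (p :: t) p
    have hsplit := length_split (p :: t) p
    have hG : k - (((p :: t).filter (fun y => decide (y < p))).length + (p :: t).countP (fun y => y == p))
        < ((p :: t).filter (fun y => decide (p < y))).length := by omega
    rw [sorted_decomp (p :: t) p]
    rw [List.getElem?_append_right (by simp only [List.length_append, hSA]; omega)]
    simp only [pvSelect, if_neg hlt, if_neg hmid]
    rw [ih hG]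
    congr 1
    simp only [List.length_append, hSA]
    omega

-- with nodup keys, looking up a key of the list yields its own value
lemma get?_mk_of_mem : ∀ (l : List (Int × List Int)) (kv : Int × List Int),
    kv ∈ l → (l.map Prod.fst).Nodup → (PySem.Dict.mk l).get? kv.1 = some kv.2 := by
  intro l
  induction l with
  | nil => intro kv h; simp at h
  | cons a l ih =>
    intro kv hmem hnd
    rw [PySem.Dict.get?_mk_cons]
    rcases List.mem_cons.mp hmem with rfl | hmem
    · simp
    · have hne : (a.1 == kv.1) = false := by
        simp only [List.map_cons, List.nodup_cons] at hnd
        have : kv.1 ∈ l.map Prod.fst := List.mem_map_of_mem hmem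
        simp only [beq_eq_false_iff_ne, ne_eq]
        intro he; exact hnd.1 (he ▸ this)
      rw [hne]
      exact ih kv hmem (by simp only [List.map_cons, List.nodup_cons] at hnd; exact hnd.2)
    -- `if_neg`-style reduction done via rw [hne]

-- the paired fold of A against the plain fold of B
lemma fold_pair (f g : (Int × List Int) → Int) :
    ∀ (l : List (Int × List Int)) (s c : Int), (∀ kv ∈ l, f kv = g kv) →
    l.foldl (fun (sc : Int × Int) kv => (sc.1 + f kv, sc.2 + 1)) (s, c)
      = (l.foldl (fun acc kv => acc + g kv) s, c + (l.length : Int)) := by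
  intro l
  induction l with
  | nil => intro s c h; simp
  | cons a l ih =>
    intro s c h
    simp only [List.foldl_cons]
    rw [h a (List.mem_cons_self ..), ih (s + g a) (c + 1) (fun kv hkv => h kv (List.mem_cons_of_mem a hkv))]
    simp only [List.length_cons]
    congr 1
    push_cast
    ring

-- ===== VERDICT (by name: the statement is the Claim_ definition above) =====
theorem calc_starting_point_spec : Claim_equal_calc_starting_point := by
  intro m _hdom ⟨hne, hval, hnd⟩
  unfold Spec_calc_starting_point calc_starting_point calc_starting_point_alt
  have hper : ∀ kv ∈ m,
      ((PySem.List.pyGet? (PySem.List.sorted (((PySem.Dict.mk m).get? kv.1).getD []) (fun y => y) false)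
        (PySem.Int.floordiv (((PySem.List.sorted (((PySem.Dict.mk m).get? kv.1).getD []) (fun y => y) false).length : Int)) 2)).getD 0)
      = pvSelect kv.2 (kv.2.length / 2) := by
    intro kv hkv
    rw [get?_mk_of_mem m kv hkv hnd]
    simp only [Option.getD_some]
    have hlen : (PySem.List.sorted kv.2 (fun y => y) false).length = kv.2.length :=
      PySem.List.length_sorted ..
    have hpos : 0 < kv.2.length := List.length_pos_of_ne_nil (hval kv hkv)
    rw [hlen]
    have hdiv : PySem.Int.floordiv ((kv.2.length : Nat) : Int) 2 = ((kv.2.length / 2 : Nat) : Int) :=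
      PySem.Int.floordiv_natCast ..
    rw [hdiv, PySem.List.pyGet?_natCast]
    rw [← pvSelect_eq_sorted kv.2 (kv.2.length / 2) (Nat.div_lt_self hpos (by omega))]
    rfl
  rw [fold_pair _ _ m 0 0 hper]
  simp
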